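-- pv_equiv track=rewrite | github.com/KyleMi/Python-Code-Sample | project_part1.py | build_constrain_mtx
-- ===== SOURCE A (Python) =====
-- def build_constrain_mtx(values_ls,arc_dic,binary_equal,binary_n_equal,binary_n_sim):
-- 	result = {}
-- 	#C
-- 	for key1 in arc_dic:
-- 		temp = {}
-- 		#A
-- 		for key2 in arc_dic:
-- 			if key1 == key2:
-- 				continue
-- 			matrix = []
-- 			#row  C value == q
-- 			for r_value in values_ls:
-- 				#row  C value == q
-- 				#column G value == p
-- 				row = []
-- 				for c_value in values_ls:
-- 					if r_value not in arc_dic[key1] or c_value not in arc_dic[key2]: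
-- 						row.append(0)
-- 						continue
-- 					#binary equal C G
-- 					if key1 in binary_equal and key2 in binary_equal[key1]:
-- 						if r_value != c_value:
-- 							row.append(0)
-- 							continue
-- 					#bianry not equal C G
-- 					if key1 in binary_n_equal and key2 in binary_n_equal[key1]:
-- 						if r_value == c_value:
-- 							row.append(0)
-- 							continue
-- 					flg = False
-- 					# if key1 and key2 not satisfies one not simultaneous case add 0
--
-- 					for not_sim_case in binary_n_sim:
-- 						if key1 in not_sim_case and key2 in not_sim_case:
-- 							if r_value == not_sim_case[key1] and c_value == not_sim_case[key2]:
-- 								row.append(0)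
-- 								flg = True
-- 								break
-- 					if flg == False:
-- 						row.append(1)
-- 				matrix.append(row)
-- 			temp[key2] = matrix
-- 		result[key1] = temp
-- 	return result
-- ===== SOURCE B (Python) =====
-- def _mask(values_ls, m, pred):
--     # zero every cell whose (row value, column value) satisfies pred
--     return [[0 if pred(r, c) else v for c, v in zip(values_ls, row)]
--             for r, row in zip(values_ls, m)]
--
--
-- def build_constrain_mtx(values_ls, arc_dic, binary_equal, binary_n_equal, binary_n_sim):
--     result = {}
--     for key1 in arc_dic:
--         temp = {}
--         vs1 = arc_dic[key1]
--         for key2 in arc_dic: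
--             if key1 == key2:
--                 continue
--             vs2 = arc_dic[key2]
--             # base compatibility matrix from the arc-consistent value sets
--             m = [[1 if r in vs1 and c in vs2 else 0 for c in values_ls]
--                  for r in values_ls]
--             # masking pass: equality constraint
--             if key1 in binary_equal and key2 in binary_equal[key1]:
--                 m = _mask(values_ls, m, lambda r, c: r != c)
--             # masking pass: disequality constraint
--             if key1 in binary_n_equal and key2 in binary_n_equal[key1]:
--                 m = _mask(values_ls, m, lambda r, c: r == c)
--             # masking passes: each not-simultaneous case zeroes one cell pattern
--             for case in binary_n_sim:
--                 if key1 in case and key2 in case: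
--                     a, b = case[key1], case[key2]
--                     m = _mask(values_ls, m, lambda r, c, a=a, b=b: r == a and c == b)
--             temp[key2] = m
--         result[key1] = temp
--     return result
-- ===== Notes on version B (the rewrite author's own statement) =====
-- stated objective: alternative
-- what changed: Instead of deciding each cell 0/1 inside one nested value loop with continue/break branch logic, B builds a base membership matrix per key pair and then applies each constraint (binary_equal, binary_n_equal, each binary_n_sim case) as a separate whole-matrix masking pass; since every constraint only writes 0, pass order is irrelevant.
import Mathlib
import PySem

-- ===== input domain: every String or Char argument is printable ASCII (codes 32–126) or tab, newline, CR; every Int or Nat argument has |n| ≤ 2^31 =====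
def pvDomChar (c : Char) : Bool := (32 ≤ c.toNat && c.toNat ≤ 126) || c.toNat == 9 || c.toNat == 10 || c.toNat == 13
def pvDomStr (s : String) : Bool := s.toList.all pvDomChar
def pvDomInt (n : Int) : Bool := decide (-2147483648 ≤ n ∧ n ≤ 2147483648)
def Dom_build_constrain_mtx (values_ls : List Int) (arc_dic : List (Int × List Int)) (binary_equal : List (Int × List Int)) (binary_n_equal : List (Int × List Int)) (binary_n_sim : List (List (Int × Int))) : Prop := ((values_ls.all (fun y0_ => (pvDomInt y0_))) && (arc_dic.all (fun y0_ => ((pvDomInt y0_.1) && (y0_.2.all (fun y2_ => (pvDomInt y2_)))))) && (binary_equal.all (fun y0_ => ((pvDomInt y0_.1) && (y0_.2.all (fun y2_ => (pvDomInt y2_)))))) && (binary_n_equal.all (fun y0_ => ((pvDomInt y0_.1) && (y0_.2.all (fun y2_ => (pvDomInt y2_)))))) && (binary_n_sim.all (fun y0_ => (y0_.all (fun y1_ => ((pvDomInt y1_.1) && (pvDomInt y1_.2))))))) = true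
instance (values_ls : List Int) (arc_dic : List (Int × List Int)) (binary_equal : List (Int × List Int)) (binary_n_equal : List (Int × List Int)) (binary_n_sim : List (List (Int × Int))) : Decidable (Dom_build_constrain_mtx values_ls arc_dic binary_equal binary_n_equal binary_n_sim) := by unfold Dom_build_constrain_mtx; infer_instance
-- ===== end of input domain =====

-- B replaces A's per-cell continue/break branch logic by a base membership matrix plus
-- separate whole-matrix masking passes, one per constraint (objective: alternative).

-- ===== PORT A =====
-- the inner `for not_sim_case in binary_n_sim: … break` loop of A
def pvA_nsim (key1 key2 r c : Int) : List (List (Int × Int)) → Bool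
  | [] => false
  | cs :: rest =>
    let d := PySem.Dict.mk cs
    if d.contains key1 && d.contains key2 then
      if r == d.getD key1 0 && c == d.getD key2 0 then true
      else pvA_nsim key1 key2 r c rest
    else pvA_nsim key1 key2 r c rest

-- the body of A's innermost loop: the single value appended for (r, c)
-- (dict lookups arc_dic[key1] etc. are getD with []: every looked-up key is present —
--  arc keys come from iterating arc_dic, constraint lookups are guarded by `contains`)
def pvA_cell (arc_dic binary_equal binary_n_equal : List (Int × List Int)) (binary_n_sim : List (List (Int × Int))) (key1 key2 r c : Int) : Int :=
  if !((PySem.Dict.mk arc_dic).getD key1 []).contains r || !((PySem.Dict.mk arc_dic).getD key2 []).contains c then 0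
  else if ((PySem.Dict.mk binary_equal).contains key1 && ((PySem.Dict.mk binary_equal).getD key1 []).contains key2) && !(r == c) then 0
  else if ((PySem.Dict.mk binary_n_equal).contains key1 && ((PySem.Dict.mk binary_n_equal).getD key1 []).contains key2) && (r == c) then 0
  else if pvA_nsim key1 key2 r c binary_n_sim then 0 else 1

def build_constrain_mtx (values_ls : List Int) (arc_dic : List (Int × List Int)) (binary_equal : List (Int × List Int)) (binary_n_equal : List (Int × List Int)) (binary_n_sim : List (List (Int × Int))) : List (Int × List (Int × List (List Int))) :=
  (arc_dic.foldl (fun result kv1 =>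
    let key1 := kv1.1
    let temp := arc_dic.foldl (fun temp kv2 =>
      let key2 := kv2.1
      if key1 == key2 then temp
      else
        let matrix := values_ls.foldl (fun m r =>
          m ++ [values_ls.foldl (fun row c =>
            row ++ [pvA_cell arc_dic binary_equal binary_n_equal binary_n_sim key1 key2 r c]) []]) []
        temp.insert key2 matrix) (PySem.Dict.empty : PySem.Dict Int (List (List Int)))
    result.insert key1 temp.items) (PySem.Dict.empty : PySem.Dict Int (List (Int × List (List Int))))).items

-- ===== PORT B =====
-- _mask of Source B: zero every cell whose (row value, column value) satisfies p
def pvB_mask (values_ls : List Int) (p : Int → Int → Bool) (m : List (List Int)) : List (List Int) :=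
  (values_ls.zip m).map (fun rr => (values_ls.zip rr.2).map (fun cv => if p rr.1 cv.1 then 0 else cv.2))

-- per key pair: base membership matrix, then the masking passes
def pvB_matrix (values_ls : List Int) (arc_dic binary_equal binary_n_equal : List (Int × List Int)) (binary_n_sim : List (List (Int × Int))) (key1 key2 : Int) : List (List Int) :=
  let vs1 := (PySem.Dict.mk arc_dic).getD key1 []
  let vs2 := (PySem.Dict.mk arc_dic).getD key2 []
  let m0 := values_ls.map (fun r => values_ls.map (fun c => if vs1.contains r && vs2.contains c then (1 : Int) else 0))
  let m1 := if (PySem.Dict.mk binary_equal).contains key1 && ((PySem.Dict.mk binary_equal).getD key1 []).contains key2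
            then pvB_mask values_ls (fun r c => !(r == c)) m0 else m0
  let m2 := if (PySem.Dict.mk binary_n_equal).contains key1 && ((PySem.Dict.mk binary_n_equal).getD key1 []).contains key2
            then pvB_mask values_ls (fun r c => r == c) m1 else m1
  binary_n_sim.foldl (fun m cs =>
    let d := PySem.Dict.mk cs
    if d.contains key1 && d.contains key2 then
      pvB_mask values_ls (fun r c => r == d.getD key1 0 && c == d.getD key2 0) m
    else m) m2

def build_constrain_mtx_alt (values_ls : List Int) (arc_dic : List (Int × List Int)) (binary_equal : List (Int × List Int)) (binary_n_equal : List (Int × List Int)) (binary_n_sim : List (List (Int × Int))) : List (Int × List (Int × List (List Int))) :=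
  (arc_dic.foldl (fun result kv1 =>
    let key1 := kv1.1
    let temp := arc_dic.foldl (fun temp kv2 =>
      let key2 := kv2.1
      if key1 == key2 then temp
      else temp.insert key2 (pvB_matrix values_ls arc_dic binary_equal binary_n_equal binary_n_sim key1 key2))
      (PySem.Dict.empty : PySem.Dict Int (List (List Int)))
    result.insert key1 temp.items) (PySem.Dict.empty : PySem.Dict Int (List (Int × List (List Int))))).items

-- ===== PRECONDITION & SPEC =====
def Spec_build_constrain_mtx (values_ls : List Int) (arc_dic : List (Int × List Int)) (binary_equal : List (Int × List Int)) (binary_n_equal : List (Int × List Int)) (binary_n_sim : List (List (Int × Int))) (out : List (Int × List (Int × List (List Int)))) : Prop := out = build_constrain_mtx_alt values_ls arc_dic binary_equal binary_n_equal binary_n_sim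
instance (values_ls : List Int) (arc_dic : List (Int × List Int)) (binary_equal : List (Int × List Int)) (binary_n_equal : List (Int × List Int)) (binary_n_sim : List (List (Int × Int))) (out : List (Int × List (Int × List (List Int)))) : Decidable (Spec_build_constrain_mtx values_ls arc_dic binary_equal binary_n_equal binary_n_sim out) := by unfold Spec_build_constrain_mtx; infer_instance

-- ===== CLAIM (what is proved, stated in full; the proofs are below) =====
def Claim_equal_build_constrain_mtx : Prop := ∀ (values_ls : List Int) (arc_dic : List (Int × List Int)) (binary_equal : List (Int × List Int)) (binary_n_equal : List (Int × List Int)) (binary_n_sim : List (List (Int × Int))), Dom_build_constrain_mtx values_ls arc_dic binary_equal binary_n_equal binary_n_sim → Spec_build_constrain_mtx values_ls arc_dic binary_equal binary_n_equal binary_n_sim (build_constrain_mtx values_ls arc_dic binary_equal binary_n_equal binary_n_sim)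

-- ===== LEMMAS AND PROOFS =====

-- A's append-loop is the map
theorem pv_foldl_app {α β : Type} (l : List α) (f : α → β) (init : List β) :
    l.foldl (fun acc x => acc ++ [f x]) init = init ++ l.map f := by
  induction l generalizing init with
  | nil => simp
  | cons x xs ih => simp [List.foldl, ih]

theorem pv_zip_self_map {α β γ : Type} (l : List α) (f : α → β) (h : α × β → γ) :
    (l.zip (l.map f)).map h = l.map (fun x => h (x, f x)) := by
  induction l with
  | nil => simp
  | cons x xs ih => simp [ih]

-- masking a map-shaped matrix is a pointwise if
theorem pv_mask_map (vl : List Int) (p : Int → Int → Bool) (g : Int → Int → Int) :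
    pvB_mask vl p (vl.map (fun r => vl.map (g r)))
      = vl.map (fun r => vl.map (fun c => if p r c then 0 else g r c)) := by
  unfold pvB_mask
  simp only [pv_zip_self_map]

theorem pv_mask_if_map (vl : List Int) (cond : Bool) (p : Int → Int → Bool) (g : Int → Int → Int) :
    (if cond then pvB_mask vl p (vl.map (fun r => vl.map (g r))) else vl.map (fun r => vl.map (g r)))
      = vl.map (fun r => vl.map (fun c => if cond then (if p r c then 0 else g r c) else g r c)) := by
  cases cond <;> simp [pv_mask_map]

-- the cell-level trace of B's binary_n_sim masking passes
def pvNsimCell (key1 key2 r c : Int) (v : Int) : List (List (Int × Int)) → Int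
  | [] => v
  | cs :: rest =>
    let d := PySem.Dict.mk cs
    pvNsimCell key1 key2 r c
      (if d.contains key1 && d.contains key2 then
        (if r == d.getD key1 0 && c == d.getD key2 0 then 0 else v) else v) rest

theorem pv_nsim_fold (bns : List (List (Int × Int))) (vl : List Int) (key1 key2 : Int) (g : Int → Int → Int) :
    bns.foldl (fun m cs =>
        let d := PySem.Dict.mk cs
        if d.contains key1 && d.contains key2 then
          pvB_mask vl (fun r c => r == d.getD key1 0 && c == d.getD key2 0) m
        else m) (vl.map (fun r => vl.map (g r)))
      = vl.map (fun r => vl.map (fun c => pvNsimCell key1 key2 r c (g r c) bns)) := by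
  induction bns generalizing g with
  | nil => simp [pvNsimCell]
  | cons cs rest ih =>
    simp only [List.foldl, pvNsimCell]
    by_cases h : ((PySem.Dict.mk cs).contains key1 && (PySem.Dict.mk cs).contains key2) = true
    · simp only [h, if_true, pv_mask_map]
      exact ih _
    · simp only [Bool.not_eq_true] at h
      simp only [h, Bool.false_eq_true, if_false]
      exact ih _

theorem pv_nsimCell_zero (key1 key2 r c : Int) (bns : List (List (Int × Int))) :
    pvNsimCell key1 key2 r c 0 bns = 0 := by
  induction bns with
  | nil => rfl
  | cons cs rest ih => simp only [pvNsimCell]; split_ifs <;> exact ih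

theorem pv_nsimCell_one (key1 key2 r c : Int) (bns : List (List (Int × Int))) :
    pvNsimCell key1 key2 r c 1 bns = if pvA_nsim key1 key2 r c bns then 0 else 1 := by
  induction bns with
  | nil => rfl
  | cons cs rest ih =>
    simp only [pvNsimCell, pvA_nsim]
    split_ifs with h1 h2 <;> simp_all [pv_nsimCell_zero]

-- B's cell value after all passes equals A's cell value
theorem pv_cell_eq (arc_dic binary_equal binary_n_equal : List (Int × List Int))
    (binary_n_sim : List (List (Int × Int))) (key1 key2 r c : Int) :
    pvNsimCell key1 key2 r c
      (if ((PySem.Dict.mk binary_n_equal).contains key1 && ((PySem.Dict.mk binary_n_equal).getD key1 []).contains key2) then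
        (if (r == c) then 0 else
          (if ((PySem.Dict.mk binary_equal).contains key1 && ((PySem.Dict.mk binary_equal).getD key1 []).contains key2) then
            (if !(r == c) then 0 else
              (if ((PySem.Dict.mk arc_dic).getD key1 []).contains r && ((PySem.Dict.mk arc_dic).getD key2 []).contains c then 1 else 0))
          else
            (if ((PySem.Dict.mk arc_dic).getD key1 []).contains r && ((PySem.Dict.mk arc_dic).getD key2 []).contains c then 1 else 0)))
      else
        (if ((PySem.Dict.mk binary_equal).contains key1 && ((PySem.Dict.mk binary_equal).getD key1 []).contains key2) then
          (if !(r == c) then 0 else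
            (if ((PySem.Dict.mk arc_dic).getD key1 []).contains r && ((PySem.Dict.mk arc_dic).getD key2 []).contains c then 1 else 0))
        else
          (if ((PySem.Dict.mk arc_dic).getD key1 []).contains r && ((PySem.Dict.mk arc_dic).getD key2 []).contains c then 1 else 0)))
      binary_n_sim
    = pvA_cell arc_dic binary_equal binary_n_equal binary_n_sim key1 key2 r c := by
  unfold pvA_cell
  split_ifs <;> simp_all [pv_nsimCell_zero, pv_nsimCell_one]

-- per key pair, A's nested value loops produce B's masked matrix
theorem pv_matrix_eq (vl : List Int) (arc_dic binary_equal binary_n_equal : List (Int × List Int))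
    (binary_n_sim : List (List (Int × Int))) (key1 key2 : Int) :
    vl.foldl (fun m r =>
        m ++ [vl.foldl (fun row c =>
          row ++ [pvA_cell arc_dic binary_equal binary_n_equal binary_n_sim key1 key2 r c]) []]) []
      = pvB_matrix vl arc_dic binary_equal binary_n_equal binary_n_sim key1 key2 := by
  unfold pvB_matrix
  simp only [pv_foldl_app, List.nil_append, pv_mask_if_map, pv_nsim_fold]
  refine List.map_congr_left (fun r _ => List.map_congr_left (fun c _ => ?_))
  exact (pv_cell_eq arc_dic binary_equal binary_n_equal binary_n_sim key1 key2 r c).symm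

theorem pv_foldl_congr {α β : Type} (l : List α) (f g : β → α → β) (init : β)
    (h : ∀ b a, f b a = g b a) : l.foldl f init = l.foldl g init := by
  induction l generalizing init with
  | nil => rfl
  | cons x xs ih => simp only [List.foldl, h]; exact ih _

-- ===== VERDICT (by name: the statement is the Claim_ definition above) =====
theorem build_constrain_mtx_spec : Claim_equal_build_constrain_mtx := by
  intro values_ls arc_dic binary_equal binary_n_equal binary_n_sim _
  unfold Spec_build_constrain_mtx build_constrain_mtx build_constrain_mtx_alt
  refine congrArg PySem.Dict.items ?_
  refine pv_foldl_congr _ _ _ _ (fun res kv1 => ?_)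
  refine congrArg (fun t => res.insert kv1.1 (PySem.Dict.items t)) ?_
  refine pv_foldl_congr _ _ _ _ (fun t kv2 => ?_)
  by_cases h : (kv1.1 == kv2.1) = true
  · simp [h]
  · simp only [Bool.not_eq_true] at h
    simp only [h, Bool.false_eq_true, if_false]
    exact congrArg (t.insert kv2.1) (pv_matrix_eq _ _ _ _ _ _ _)
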